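-- pv_equiv track=rewrite | github.com/TheoLee021/LeetCode | DuplicatesEveryDigit.py | solution
-- ===== SOURCE A (Python) =====
-- def solution(n):
--     duplicated_n = 0
--     digits = 1
--     while n > 0:
--         digit = n % 10
--         duplicated_n += (digit * digits) + (digit * digits * 10)
--         digits *= 100
--         n //= 10
--     return duplicated_n
-- ===== SOURCE B (Python) =====
-- def solution(n):
--     if n <= 0:
--         return 0
--     return solution(n // 10) * 100 + (n % 10) * 11
-- ===== Notes on version B (the rewrite author's own statement) =====
-- stated objective: simpler
-- what changed: Replaces the explicit while-loop that carries a mutable accumulator and a growing place-value multiplier with a two-line Horner-style recursion that pairs each extracted digit twice and recurses on the remaining prefix; the nonpositive base case is the recursion's natural terminator and coincides with A's loop never running.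
import Mathlib
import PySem

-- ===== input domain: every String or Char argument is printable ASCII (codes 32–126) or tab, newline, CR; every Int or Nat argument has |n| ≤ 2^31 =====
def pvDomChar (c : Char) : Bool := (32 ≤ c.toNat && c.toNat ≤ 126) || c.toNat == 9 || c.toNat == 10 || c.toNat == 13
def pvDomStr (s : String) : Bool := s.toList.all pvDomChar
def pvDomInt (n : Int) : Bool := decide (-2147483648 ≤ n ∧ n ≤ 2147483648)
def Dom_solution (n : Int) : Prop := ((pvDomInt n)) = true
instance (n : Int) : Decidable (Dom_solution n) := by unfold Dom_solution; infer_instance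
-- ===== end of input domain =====

-- B replaces A's while-loop (mutable accumulator + place-value multiplier) with a
-- two-line Horner-style recursion; same return value for every Int input.

-- termination measure fact used by both ports' recursions
theorem pv_floordiv10_lt (n : Int) (h : 0 < n) :
    (PySem.Int.floordiv n 10).toNat < n.toNat := by
  rw [PySem.Int.floordiv_eq_ediv_of_pos (by norm_num)]
  omega

-- ===== PORT A =====
def solutionLoop (n dup digits : Int) : Int :=
  if h : n > 0 then
    solutionLoop (PySem.Int.floordiv n 10)
      (dup + ((PySem.Int.mod n 10) * digits + (PySem.Int.mod n 10) * digits * 10))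
      (digits * 100)
  else dup
termination_by n.toNat
decreasing_by exact pv_floordiv10_lt n h

def solution (n : Int) : Int := solutionLoop n 0 1

-- ===== PORT B =====
def solution_alt (n : Int) : Int :=
  if h : n ≤ 0 then 0
  else solution_alt (PySem.Int.floordiv n 10) * 100 + (PySem.Int.mod n 10) * 11
termination_by n.toNat
decreasing_by exact pv_floordiv10_lt n (by omega)

-- ===== PRECONDITION & SPEC =====
def Spec_solution (n : Int) (out : Int) : Prop := out = solution_alt n
instance (n : Int) (out : Int) : Decidable (Spec_solution n out) := by unfold Spec_solution; infer_instance

-- ===== CLAIM (what is proved, stated in full; the proofs are below) =====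
def Claim_equal_solution : Prop := ∀ (n : Int), Dom_solution n → Spec_solution n (solution n)

-- ===== LEMMAS AND PROOFS =====

theorem solutionLoop_eq (k : Nat) : ∀ (n dup digits : Int), n.toNat ≤ k →
    solutionLoop n dup digits = dup + digits * solution_alt n := by
  induction k with
  | zero =>
    intro n dup digits hk
    have hn : ¬ n > 0 := by omega
    rw [solutionLoop, solution_alt]
    simp [hn, (by omega : n ≤ 0)]
  | succ k ih =>
    intro n dup digits hk
    by_cases hn : n > 0
    · rw [solutionLoop, solution_alt]
      rw [dif_pos hn, dif_neg (by omega : ¬ n ≤ 0)]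
      rw [ih _ _ _ (by have := pv_floordiv10_lt n hn; omega)]
      ring
    · rw [solutionLoop, solution_alt]
      simp [hn, (by omega : n ≤ 0)]

-- ===== VERDICT (by name: the statement is the Claim_ definition above) =====
theorem solution_spec : Claim_equal_solution := by
  intro n _
  show solution n = solution_alt n
  rw [solution, solutionLoop_eq n.toNat n 0 1 le_rfl]
  ring
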